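-- pv_equiv track=rewrite | github.com/itchono/ESC180-Repo | FinalExamReview.py | count_upper_lower
-- ===== SOURCE A (Python) =====
-- def count_upper_lower(s):
--
--     u = 0
--     l = 0
--
--     for c in s:
--         if c.isupper():
--             u += 1
--         elif c.islower():
--             l += 1
--     return (u, l) # tuple return oooo
-- ===== SOURCE B (Python) =====
-- def count_upper_lower(s):
--     u = sum(1 for c in s if c.isupper())
--     l = sum(1 for c in s if c.islower())
--     return (u, l)
-- ===== Notes on version B (the rewrite author's own statement) =====
-- stated objective: idiomatic
-- what changed: Replaces the single accumulator loop with if/elif by two independent filtered-sum passes, one per count.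
import Mathlib
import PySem

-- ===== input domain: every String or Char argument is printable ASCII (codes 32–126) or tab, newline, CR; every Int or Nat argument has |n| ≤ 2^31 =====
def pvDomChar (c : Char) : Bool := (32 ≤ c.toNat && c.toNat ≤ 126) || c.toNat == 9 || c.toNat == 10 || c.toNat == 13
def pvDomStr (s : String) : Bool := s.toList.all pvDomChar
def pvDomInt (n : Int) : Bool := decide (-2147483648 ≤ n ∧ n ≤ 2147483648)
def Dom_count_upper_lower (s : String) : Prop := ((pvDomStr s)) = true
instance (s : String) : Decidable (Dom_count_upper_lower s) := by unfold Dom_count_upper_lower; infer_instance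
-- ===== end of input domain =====

-- B counts uppercase and lowercase letters in two independent filtered passes instead of A's single if/elif accumulator loop (idiomatic; same cost).

-- ===== PORT A =====
def count_upper_lower (s : String) : Int × Int :=
  s.toList.foldl (fun (p : Int × Int) c =>
    if PySem.Chars.isupper c then (p.1 + 1, p.2)
    else if PySem.Chars.islower c then (p.1, p.2 + 1)
    else p) (0, 0)

-- ===== PORT B =====
def count_upper_lower_alt (s : String) : Int × Int :=
  ((s.toList.countP (fun c => PySem.Chars.isupper c) : Int),
   (s.toList.countP (fun c => PySem.Chars.islower c) : Int))

-- ===== PRECONDITION & SPEC =====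
def Spec_count_upper_lower (s : String) (out : Int × Int) : Prop := out = count_upper_lower_alt s
instance (s : String) (out : Int × Int) : Decidable (Spec_count_upper_lower s out) := by unfold Spec_count_upper_lower; infer_instance

-- ===== CLAIM (what is proved, stated in full; the proofs are below) =====
def Claim_equal_count_upper_lower : Prop := ∀ (s : String), Dom_count_upper_lower s → Spec_count_upper_lower s (count_upper_lower s)

-- ===== LEMMAS AND PROOFS =====

-- ===== VERDICT (by name: the statement is the Claim_ definition above) =====
theorem cul_loop (l : List Char) (u v : Int) :
    l.foldl (fun (p : Int × Int) c =>
      if PySem.Chars.isupper c then (p.1 + 1, p.2)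
      else if PySem.Chars.islower c then (p.1, p.2 + 1)
      else p) (u, v)
    = (u + (l.countP (fun c => PySem.Chars.isupper c) : Int),
       v + (l.countP (fun c => PySem.Chars.islower c) : Int)) := by
  induction l generalizing u v with
  | nil => simp
  | cons c t ih =>
    simp only [List.foldl_cons, List.countP_cons]
    by_cases hu : PySem.Chars.isupper c
    · have hl : PySem.Chars.islower c = false := by
        revert hu
        simp [PySem.Chars.isupper, PySem.Chars.islower]
        intro h1 h2 h3
        exact absurd (h2.trans_lt (by decide : ('Z' : Char) < 'a')) (not_lt.mpr h3)
      simp [hu, hl, ih]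
      push_cast
      ring_nf
    · by_cases hl : PySem.Chars.islower c
      · simp [hu, hl, ih]
        push_cast
        ring_nf
      · simp [hu, hl, ih]

theorem count_upper_lower_spec : Claim_equal_count_upper_lower := by
  intro s _
  unfold Spec_count_upper_lower count_upper_lower count_upper_lower_alt
  rw [cul_loop]
  simp
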